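-- pv_equiv track=rewrite | github.com/andersen-mats/uio | IN1000/trix/eksamensoppgaver/ekstra_lang_liste.py | ekstra_lang
-- ===== SOURCE A (Python) =====
-- def ekstra_lang(liste):
--     ny_liste = list()
--
--     cnt = 0
--     while len(ny_liste) < len(liste) * 2:
--         ny_liste.append(liste[cnt])
--         ny_liste.append(42)
--         cnt += 1
--
--     return ny_liste
-- ===== SOURCE B (Python) =====
-- def ekstra_lang(liste):
--     ny_liste = [42] * (2 * len(liste))
--     ny_liste[0::2] = liste
--     return ny_liste
-- ===== Notes on version B (the rewrite author's own statement) =====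
-- stated objective: idiomatic
-- what changed: Preallocates a list of 2*len 42s and places the elements at even positions by strided slice assignment, instead of growing the result pair-by-pair with appends in a while loop.
import Mathlib
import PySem

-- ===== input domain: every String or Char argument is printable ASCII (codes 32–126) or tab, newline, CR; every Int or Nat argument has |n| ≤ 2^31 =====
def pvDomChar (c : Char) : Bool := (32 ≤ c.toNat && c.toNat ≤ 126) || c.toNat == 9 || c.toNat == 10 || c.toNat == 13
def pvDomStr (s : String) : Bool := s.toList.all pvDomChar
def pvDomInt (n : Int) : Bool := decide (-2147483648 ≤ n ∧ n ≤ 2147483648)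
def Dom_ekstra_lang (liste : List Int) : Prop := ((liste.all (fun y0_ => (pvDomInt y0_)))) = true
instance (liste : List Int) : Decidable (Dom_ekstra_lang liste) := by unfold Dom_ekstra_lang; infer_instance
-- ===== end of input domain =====

-- B preallocates [42]*(2n) and writes the elements into the even slots (strided slice
-- assignment) instead of A's while loop growing the result with two appends per element.

-- ===== PORT A =====
-- A's while loop: state is ny_liste and cnt; pyGet? = liste[cnt] (none = IndexError, unreachable here)
def ekstraLoop (liste ny : List Int) (cnt : Int) : List Int :=
  if ny.length < liste.length * 2 then
    match PySem.List.pyGet? liste cnt with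
    | some v => ekstraLoop liste (ny ++ [v, 42]) (cnt + 1)
    | none => ny
  else ny
termination_by liste.length * 2 - ny.length
decreasing_by simp; omega

def ekstra_lang (liste : List Int) : List Int := ekstraLoop liste [] 0

-- ===== PORT B =====
-- ny_liste[0::2] = liste : write each element of `vs` into every second slot of `res`
def setStride2 (res vs : List Int) : List Int :=
  match res, vs with
  | res, [] => res
  | [], _ => []
  | [_], v :: _ => [v]
  | _ :: r1 :: rs, v :: vs => v :: r1 :: setStride2 rs vs

def ekstra_lang_alt (liste : List Int) : List Int :=
  setStride2 (List.replicate (2 * liste.length) 42) liste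

-- ===== PRECONDITION & SPEC =====
def Spec_ekstra_lang (liste : List Int) (out : List Int) : Prop := out = ekstra_lang_alt liste
instance (liste : List Int) (out : List Int) : Decidable (Spec_ekstra_lang liste out) := by unfold Spec_ekstra_lang; infer_instance

-- ===== CLAIM (what is proved, stated in full; the proofs are below) =====
def Claim_equal_ekstra_lang : Prop := ∀ (liste : List Int), Dom_ekstra_lang liste → Spec_ekstra_lang liste (ekstra_lang liste)

-- ===== LEMMAS AND PROOFS =====

def interleave42 (liste : List Int) : List Int := liste.flatMap (fun v => [v, 42])

theorem loopA (suf : List Int) : ∀ (pre ny : List Int), ny.length = pre.length * 2 →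
    ekstraLoop (pre ++ suf) ny (pre.length : Int) = ny ++ interleave42 suf := by
  induction suf with
  | nil =>
    intro pre ny h
    unfold ekstraLoop
    simp [h, interleave42]
  | cons v vs ih =>
    intro pre ny h
    unfold ekstraLoop
    rw [if_pos (by simp [h]; try omega)]
    rw [PySem.List.pyGet?_append_length]
    have h2 : ny.length + 2 = (pre ++ [v]).length * 2 := by simp [h]; try ring
    have := ih (pre ++ [v]) (ny ++ [v, 42]) (by simpa using h2)
    simp only [List.append_assoc, List.singleton_append, List.length_append,
      List.length_singleton] at this
    push_cast at this
    simpa [interleave42] using this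

theorem altB (liste : List Int) :
    setStride2 (List.replicate (2 * liste.length) 42) liste = interleave42 liste := by
  induction liste with
  | nil => simp [setStride2, interleave42]
  | cons v vs ih =>
    have : 2 * (v :: vs).length = (2 * vs.length) + 1 + 1 := by simp; omega
    rw [this, List.replicate_succ, List.replicate_succ, setStride2, ih]
    simp [interleave42]

-- ===== VERDICT (by name: the statement is the Claim_ definition above) =====
theorem ekstra_lang_spec : Claim_equal_ekstra_lang := by
  intro liste _
  unfold Spec_ekstra_lang ekstra_lang ekstra_lang_alt
  have := loopA liste [] [] rfl
  simpa [altB] using this
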